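-- pv_equiv track=rewrite | github.com/pfayle/adventofcode2021 | 3/part2.py | net_zeroes
-- ===== SOURCE A (Python) =====
-- def net_zeroes(ls):
--     r = []
--     for w in ls:
--         for i in range(len(w)):
--             if i >= len(r):
--                 r.append(0)
--             if w[i] == "0":
--                 r[i] += 1
--             else:
--                 r[i] -= 1
--     return r
-- ===== SOURCE B (Python) =====
-- def net_zeroes(ls):
--     n = max(map(len, ls), default=0)
--     return [sum(1 if w[i] == "0" else -1 for w in ls if i < len(w))
--             for i in range(n)]
-- ===== Notes on version B (the rewrite author's own statement) =====
-- stated objective: idiomatic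
-- what changed: Replaces the row-major accumulating double loop with grow-and-mutate of a shared list by a column-major list comprehension: for each column index up to the max word length, sum +1/-1 over the words long enough to reach it.
import Mathlib
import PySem

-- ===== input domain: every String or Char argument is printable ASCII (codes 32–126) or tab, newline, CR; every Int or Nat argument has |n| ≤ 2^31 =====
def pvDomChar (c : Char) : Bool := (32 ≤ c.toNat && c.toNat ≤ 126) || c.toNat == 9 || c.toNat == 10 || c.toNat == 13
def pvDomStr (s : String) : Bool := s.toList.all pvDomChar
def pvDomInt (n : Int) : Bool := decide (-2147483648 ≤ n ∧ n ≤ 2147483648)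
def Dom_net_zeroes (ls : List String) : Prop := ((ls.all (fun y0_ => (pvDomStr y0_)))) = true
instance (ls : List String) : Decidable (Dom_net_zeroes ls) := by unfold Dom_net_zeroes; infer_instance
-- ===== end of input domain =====

-- B computes the same per-column net counts column-major (one comprehension over column indices) instead of A's row-major growing accumulator list; same cost, more idiomatic.

-- ===== PORT A =====
-- one step of A's inner loop body: grow r with a 0 if i is past the end, then r[i] += ±1
def pvStepA (w : List Char) (r : List Int) (i : Nat) : List Int :=
  let r' := if r.length ≤ i then r ++ [0] else r
  r'.set i (r'.getD i 0 + (if w.getD i ' ' = '0' then 1 else -1))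

def net_zeroes (ls : List String) : List Int :=
  ls.foldl (fun r w => (List.range w.toList.length).foldl (pvStepA w.toList) r) []

-- ===== PORT B =====
def net_zeroes_alt (ls : List String) : List Int :=
  let n := (ls.map (fun w => w.toList.length)).foldl Nat.max 0
  (List.range n).map (fun i =>
    (ls.filter (fun w => decide (i < w.toList.length))).foldl
      (fun s w => s + (if w.toList.getD i ' ' = '0' then 1 else -1)) 0)

-- ===== PRECONDITION & SPEC =====
def Spec_net_zeroes (ls : List String) (out : List Int) : Prop := out = net_zeroes_alt ls
instance (ls : List String) (out : List Int) : Decidable (Spec_net_zeroes ls out) := by unfold Spec_net_zeroes; infer_instance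

-- ===== CLAIM (what is proved, stated in full; the proofs are below) =====
def Claim_equal_net_zeroes : Prop := ∀ (ls : List String), Dom_net_zeroes ls → Spec_net_zeroes ls (net_zeroes ls)

-- ===== LEMMAS AND PROOFS =====
-- the ±1 contribution of word w at column i
def pvContrib (w : List Char) (i : Nat) : Int := if w.getD i ' ' = '0' then 1 else -1

-- total contribution of column i over all words (the value both programs compute)
def pvG (ls : List String) (i : Nat) : Int :=
  (ls.map (fun w => if i < w.toList.length then pvContrib w.toList i else 0)).sum

lemma getD_append_zero (s : List Int) (j : Nat) : (s ++ [(0:Int)]).getD j 0 = s.getD j 0 := by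
  induction s generalizing j with
  | nil => cases j <;> simp [List.getD]
  | cons a s ih => cases j <;> simp [List.getD] at * <;> exact ih _

lemma getD_set (l : List Int) (i j : Nat) (a : Int) :
    (l.set i a).getD j 0 = if j = i ∧ i < l.length then a else l.getD j 0 := by
  simp [List.getD]
  rw [List.getElem?_set]
  split_ifs <;> simp_all <;> omega

lemma stepA_eq (w : List Char) (s : List Int) (i : Nat) :
    pvStepA w s i = (if s.length ≤ i then s ++ [0] else s).set i
      ((if s.length ≤ i then s ++ [0] else s).getD i 0 + pvContrib w i) := rfl

lemma pad_getD (s : List Int) (i k : Nat) :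
    (if s.length ≤ i then s ++ [0] else s).getD k 0 = s.getD k 0 := by
  split_ifs
  · exact getD_append_zero s k
  · rfl

lemma stepA_len (w : List Char) (s : List Int) (i : Nat) (h : i ≤ s.length) :
    (pvStepA w s i).length = max s.length (i+1) := by
  rw [stepA_eq]; split_ifs <;> simp <;> omega

lemma stepA_getD (w : List Char) (s : List Int) (i j : Nat) (h : i ≤ s.length) :
    (pvStepA w s i).getD j 0 = s.getD j 0 + if j = i then pvContrib w i else 0 := by
  rw [stepA_eq, getD_set]
  have hlen : i < (if s.length ≤ i then s ++ [0] else s).length := by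
    split_ifs with hc
    · simp only [List.length_append, List.length_cons, List.length_nil]; omega
    · omega
  by_cases hj : j = i
  · rw [if_pos ⟨hj, hlen⟩, pad_getD, hj, if_pos rfl]
  · rw [if_neg (by tauto), pad_getD, if_neg hj, add_zero]

lemma loopA_len (w : List Char) : ∀ (n : Nat) (r : List Int),
    ((List.range n).foldl (pvStepA w) r).length = max r.length n := by
  intro n
  induction n with
  | zero => simp
  | succ n ih =>
    intro r
    rw [List.range_succ, List.foldl_append]
    simp only [List.foldl_cons, List.foldl_nil]
    rw [stepA_len w _ n (by rw [ih]; omega), ih]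
    omega

lemma loopA_getD (w : List Char) : ∀ (n : Nat) (r : List Int) (j : Nat),
    ((List.range n).foldl (pvStepA w) r).getD j 0
      = r.getD j 0 + if j < n then pvContrib w j else 0 := by
  intro n
  induction n with
  | zero => simp
  | succ n ih =>
    intro r j
    rw [List.range_succ, List.foldl_append]
    simp only [List.foldl_cons, List.foldl_nil]
    rw [stepA_getD w _ n j (by rw [loopA_len]; omega), ih]
    rcases Nat.lt_trichotomy j n with hl | he | hg
    · rw [if_pos hl, if_neg (by omega : ¬ j = n), if_pos (by omega : j < n+1), add_zero]
    · subst he; rw [if_neg (by omega : ¬ j < j), if_pos rfl, if_pos (by omega : j < j+1)]; ring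
    · rw [if_neg (by omega : ¬ j < n), if_neg (by omega : ¬ j = n), if_neg (by omega : ¬ j < n+1)]; ring

lemma outer_len : ∀ (ls : List String) (r : List Int),
    (ls.foldl (fun r w => (List.range w.toList.length).foldl (pvStepA w.toList) r) r).length
      = ls.foldl (fun m w => max m w.toList.length) r.length := by
  intro ls
  induction ls with
  | nil => intro r; rfl
  | cons w ls ih =>
    intro r
    simp only [List.foldl_cons]
    rw [ih, loopA_len]

lemma outer_getD : ∀ (ls : List String) (r : List Int) (j : Nat),
    (ls.foldl (fun r w => (List.range w.toList.length).foldl (pvStepA w.toList) r) r).getD j 0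
      = r.getD j 0 + pvG ls j := by
  intro ls
  induction ls with
  | nil => intro r j; simp [pvG]
  | cons w ls ih =>
    intro r j
    simp only [List.foldl_cons]
    rw [ih, loopA_getD]
    simp only [pvG, List.map_cons, List.sum_cons]
    ring

lemma filter_fold (i : Nat) : ∀ (ls : List String) (c : Int),
    (ls.filter (fun w => decide (i < w.toList.length))).foldl
      (fun s w => s + (if w.toList.getD i ' ' = '0' then 1 else -1)) c
      = c + pvG ls i := by
  intro ls
  induction ls with
  | nil => intro c; simp [pvG]
  | cons w ls ih =>
    intro c
    by_cases h : i < w.toList.length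
    · rw [List.filter_cons_of_pos (by simpa using h), List.foldl_cons, ih]
      simp only [pvG, List.map_cons, List.sum_cons, if_pos h, pvContrib]
      ring
    · rw [List.filter_cons_of_neg (by simpa using h), ih]
      simp only [pvG, List.map_cons, List.sum_cons, if_neg h, zero_add]

lemma net_zeroes_eq_alt (ls : List String) : net_zeroes ls = net_zeroes_alt ls := by
  unfold net_zeroes net_zeroes_alt
  have hn : (ls.map (fun w => w.toList.length)).foldl Nat.max 0
      = ls.foldl (fun m w => max m w.toList.length) 0 := by
    rw [List.foldl_map]
  have hlen : (ls.foldl (fun r w => (List.range w.toList.length).foldl (pvStepA w.toList) r) []).length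
      = (ls.map (fun w => w.toList.length)).foldl Nat.max 0 := by
    rw [outer_len, hn]; rfl
  apply List.ext_getElem
  · simpa using hlen
  · intro i h1 h2
    rw [List.getElem_map, List.getElem_range, ← List.getD_eq_getElem _ 0 h1,
      outer_getD, filter_fold]
    simp

-- ===== VERDICT (by name: the statement is the Claim_ definition above) =====
theorem net_zeroes_spec : Claim_equal_net_zeroes := by
  intro ls _
  exact net_zeroes_eq_alt ls
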